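-- pv_equiv track=rewrite | github.com/GlebRadchenko/yul2venom | generator/venom_generator.py | _log2_exact
-- ===== SOURCE A (Python) =====
-- def _log2_exact(n: int):
--     """Return log2(n) if n is an exact power of 2, else None.
--
--     Used for power-of-2 optimizations:
--     - mul(x, 2^n) → shl(n, x)   (5 gas → 3 gas)
--     - div(x, 2^n) → shr(n, x)   (5 gas → 3 gas)
--     - mod(x, 2^n) → and(x, 2^n-1) (5 gas → 3 gas)
--     """
--     if n <= 0 or (n & (n - 1)) != 0:
--         return None
--     log2 = 0
--     while n > 1:
--         n >>= 1
--         log2 += 1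
--     return log2
-- ===== SOURCE B (Python) =====
-- def _log2_exact(n: int):
--     """Return log2(n) if n is an exact power of 2, else None."""
--     if n <= 0 or (n & (n - 1)) != 0:
--         return None
--     return n.bit_length() - 1
-- ===== Notes on version B (the rewrite author's own statement) =====
-- stated objective: idiomatic
-- what changed: The shift-and-count while loop with its running accumulator is replaced by the closed-form n.bit_length() - 1; B performs no iteration.
import Mathlib
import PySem

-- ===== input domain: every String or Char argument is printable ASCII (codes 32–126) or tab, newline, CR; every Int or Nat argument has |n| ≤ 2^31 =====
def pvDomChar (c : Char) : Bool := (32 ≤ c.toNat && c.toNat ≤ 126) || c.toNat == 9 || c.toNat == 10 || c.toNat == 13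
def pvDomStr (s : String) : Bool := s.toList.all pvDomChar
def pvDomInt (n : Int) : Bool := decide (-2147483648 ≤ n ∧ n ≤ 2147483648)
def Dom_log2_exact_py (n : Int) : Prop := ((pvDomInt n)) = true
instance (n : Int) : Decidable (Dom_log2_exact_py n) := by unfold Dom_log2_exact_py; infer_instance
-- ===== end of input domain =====

-- B replaces A's shift-and-count loop by the closed-form bit_length(n) - 1 (idiomatic; same behaviour).

-- ===== PORT A =====
-- A's while loop: n >>= 1 (floor halving of a positive int); log2 += 1 each pass.
def log2LoopA (n : Int) (log2 : Int) : Int :=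
  if _h : n > 1 then log2LoopA (n / 2) (log2 + 1) else log2
termination_by n.toNat
decreasing_by omega

def log2_exact_py (n : Int) : Option Int :=
  if n ≤ 0 || (PySem.Int.band n (n - 1)) ≠ 0 then none
  else some (log2LoopA n 0)

-- ===== PORT B =====
-- n.bit_length() for a nonneg Python int: 0 for 0, else floor(log2 n) + 1.
def pyBitLength (m : Nat) : Nat := if m = 0 then 0 else Nat.log2 m + 1

def log2_exact_py_alt (n : Int) : Option Int :=
  if n ≤ 0 || (PySem.Int.band n (n - 1)) ≠ 0 then none
  else some ((pyBitLength n.toNat : Int) - 1)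

-- ===== PRECONDITION & SPEC =====
def Spec_log2_exact_py (n : Int) (out : Option Int) : Prop := out = log2_exact_py_alt n
instance (n : Int) (out : Option Int) : Decidable (Spec_log2_exact_py n out) := by unfold Spec_log2_exact_py; infer_instance

-- ===== CLAIM (what is proved, stated in full; the proofs are below) =====
def Claim_equal_log2_exact_py : Prop := ∀ (n : Int), Dom_log2_exact_py n → Spec_log2_exact_py n (log2_exact_py n)

-- ===== LEMMAS AND PROOFS =====

-- A's loop computes acc + floor(log2 n) for every positive n (no power-of-2 fact needed).
theorem log2LoopA_eq (n : Int) (acc : Int) (hn : 0 < n) :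
    log2LoopA n acc = acc + (Nat.log2 n.toNat : Int) := by
  rw [log2LoopA]
  by_cases h : n > 1
  · simp only [h, dif_pos]
    have h2 : (0:Int) < n / 2 := by omega
    rw [log2LoopA_eq (n / 2) (acc + 1) h2]
    have hdiv : (n / 2).toNat = n.toNat / 2 := by omega
    have hlog : Nat.log2 n.toNat = Nat.log2 (n.toNat / 2) + 1 := by
      have h2n : 2 ≤ n.toNat := by omega
      have hpos : 1 ≤ Nat.log 2 n.toNat := Nat.log_pos (by norm_num) h2n
      have hd := Nat.log_div_base 2 n.toNat
      simp only [Nat.log2_eq_log_two]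
      omega
    rw [hdiv, hlog]
    push_cast
    ring
  · simp only [h, dif_neg, not_false_iff]
    have hn1 : n = 1 := by omega
    subst hn1
    simp [Nat.log2]
termination_by n.toNat
decreasing_by omega

theorem log2_exact_py_spec : Claim_equal_log2_exact_py := by
  intro n _
  show log2_exact_py n = log2_exact_py_alt n
  by_cases hb : n ≤ 0 ∨ PySem.Int.band n (n - 1) ≠ 0
  · simp [log2_exact_py, log2_exact_py_alt, hb]
  · rw [not_or, not_not] at hb
    have hn : 0 < n := by omega
    have hne : n.toNat ≠ 0 := by omega
    simp only [log2_exact_py, log2_exact_py_alt, not_le.mpr hn, hb.2, ne_eq, not_true_eq_false]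
    rw [log2LoopA_eq n 0 hn]
    unfold pyBitLength
    simp [hne]
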